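-- pv_equiv track=rewrite | github.com/shaunnorris/aoc2023 | day11.py | find_galaxies2
-- ===== SOURCE A (Python) =====
-- def transpose(strings):
--     zipped = zip(*strings)
--     transposed = [''.join(group) for group in zipped]
--     return transposed
--
-- def find_galaxies2(data,offset):
--     galaxies = []
--
--     for row in range(len(data)):
--         for col in range(len(data[0])):
--             if data[row][col] == "#":
--                 rowmap = data[row][0:col]
--                 colmap = transpose(data)[col][0:row]
--                 new_row = colmap.count('X')*(offset) + row
--                 new_col = rowmap.count('X')*(offset) + col
--                 galaxies.append((new_row, new_col))
--     return galaxies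
-- ===== SOURCE B (Python) =====
-- def find_galaxies2(data, offset):
--     # One left-to-right, top-to-bottom sweep: running per-column 'X' counts
--     # and a running per-row 'X' count replace the repeated transpose/slice/count.
--     galaxies = []
--     if not data:
--         return galaxies
--     width = len(data[0])
--     col_x = [0] * width
--     for r, rowstr in enumerate(data):
--         row_x = 0
--         for c in range(width):
--             ch = rowstr[c]
--             if ch == '#':
--                 galaxies.append((col_x[c] * offset + r, row_x * offset + c))
--             elif ch == 'X':
--                 row_x += 1
--                 col_x[c] += 1
--     return galaxies
-- ===== Notes on version B (the rewrite author's own statement) =====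
-- stated objective: alternative
-- what changed: Replaces the per-galaxy transpose of the whole grid and prefix-slice counting with a single sweep that maintains running 'X' counts per column and for the current row, doing O(1) work per cell.
import Mathlib
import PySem

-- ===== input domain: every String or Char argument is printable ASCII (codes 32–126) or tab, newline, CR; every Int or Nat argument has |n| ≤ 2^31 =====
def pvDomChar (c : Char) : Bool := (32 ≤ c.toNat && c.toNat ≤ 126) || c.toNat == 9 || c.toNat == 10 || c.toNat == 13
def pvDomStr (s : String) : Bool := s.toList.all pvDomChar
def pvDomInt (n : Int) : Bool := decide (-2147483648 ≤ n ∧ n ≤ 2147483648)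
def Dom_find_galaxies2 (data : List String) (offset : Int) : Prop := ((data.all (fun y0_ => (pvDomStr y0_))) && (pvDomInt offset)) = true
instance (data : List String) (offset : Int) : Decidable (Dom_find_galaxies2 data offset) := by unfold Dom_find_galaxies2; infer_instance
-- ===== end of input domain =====

-- B replaces A's per-galaxy transpose of the whole grid and prefix-slice counting
-- by a single sweep keeping running per-column and per-row 'X' counts (objective: alternative).

-- ===== PORT A =====
-- zip(*strings) on the underlying char lists: columns until the shortest string is exhausted
def pyZipStar (ls : List (List Char)) : List (List Char) :=
  if h : (ls.isEmpty || ls.any List.isEmpty) = true then []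
  else (ls.map fun l => l.headD ' ') :: pyZipStar (ls.map List.tail)
  termination_by (ls.headD []).length
  decreasing_by
    simp only [Bool.or_eq_true, List.isEmpty_iff, List.any_eq_true, not_or, not_exists] at h
    obtain ⟨h1, h2⟩ := h
    cases ls with
    | nil => exact absurd rfl h1
    | cons a t =>
      have ha : a ≠ [] := by
        intro e
        have := h2 a
        simp [e] at this
      cases a with
      | nil => exact absurd rfl ha
      | cons x xs => simp

def transposePy (strings : List String) : List String :=
  (pyZipStar (strings.map String.toList)).map (fun g => String.ofList g)

-- one inner-loop body of A ('.count("X")' on a 1-char needle is List.count on the chars, exact)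
def aInner (data : List String) (offset row : Int) (gal : List (Int × Int)) (col : Int) : List (Int × Int) :=
  let rowC := (PySem.List.pyGetD data row "").toList
  if PySem.List.pyGetD rowC col ' ' = '#' then
    let rowmap := PySem.List.slice rowC (some 0) (some col)
    let colmap := PySem.List.slice ((PySem.List.pyGetD (transposePy data) col "").toList) (some 0) (some row)
    gal ++ [((colmap.count 'X' : Int) * offset + row, (rowmap.count 'X' : Int) * offset + col)]
  else gal

def find_galaxies2 (data : List String) (offset : Int) : List (Int × Int) :=
  (PySem.List.pyRange 0 (data.length : Int)).foldl
    (fun gal row =>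
      (PySem.List.pyRange 0 ((data.headD "").toList.length : Int)).foldl (aInner data offset row) gal)
    []

-- ===== PORT B =====
-- one inner-loop body of B: state ((galaxies, col_x), row_x)
def altInner (offset r : Int) (rowChars : List Char)
    (s : (List (Int × Int) × List Int) × Int) (c : Nat) : (List (Int × Int) × List Int) × Int :=
  let ch := rowChars.getD c ' '
  if ch = '#' then
    ((s.1.1 ++ [(s.1.2.getD c 0 * offset + r, s.2 * offset + (c : Int))], s.1.2), s.2)
  else if ch = 'X' then
    ((s.1.1, s.1.2.set c (s.1.2.getD c 0 + 1)), s.2 + 1)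
  else s

-- one row of B's sweep: run the columns with row_x = 0, keep (galaxies, col_x)
def altOuter (offset : Int) (width : Nat)
    (st : List (Int × Int) × List Int) (rp : Int × String) : List (Int × Int) × List Int :=
  ((List.range width).foldl (altInner offset rp.1 rp.2.toList) (st, 0)).1

def find_galaxies2_alt (data : List String) (offset : Int) : List (Int × Int) :=
  match data with
  | [] => []
  | d0 :: _ =>
    let width := d0.toList.length
    ((PySem.List.enumerate data).foldl (altOuter offset width) ([], List.replicate width 0)).1

-- ===== PRECONDITION & SPEC =====
-- Pre_ excludes exactly the inputs where A raises IndexError: some row is shorter than the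
-- first row, so indexing data[row][col] (col up to len(data[0])-1) goes out of range.
def Pre_find_galaxies2 (data : List String) (offset : Int) : Prop :=
  ∀ s ∈ data, (data.headD "").toList.length ≤ s.toList.length
instance (data : List String) (offset : Int) : Decidable (Pre_find_galaxies2 data offset) := by
  unfold Pre_find_galaxies2; infer_instance

def pvWitness_find_galaxies2 : List String × Int := (["#X", ".#"], 2)

def Spec_find_galaxies2 (data : List String) (offset : Int) (out : List (Int × Int)) : Prop :=
  out = find_galaxies2_alt data offset
instance (data : List String) (offset : Int) (out : List (Int × Int)) :
    Decidable (Spec_find_galaxies2 data offset out) := by unfold Spec_find_galaxies2; infer_instance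

-- ===== CLAIM (what is proved, stated in full; the proofs are below) =====
def Claim_equal_find_galaxies2 : Prop :=
  ∀ (data : List String) (offset : Int), Dom_find_galaxies2 data offset →
    Pre_find_galaxies2 data offset →
    Spec_find_galaxies2 data offset (find_galaxies2 data offset)

-- ===== LEMMAS AND PROOFS =====

-- the full column c of the grid (default ' ' is never read on admitted inputs)
def colOf (data : List String) (c : Nat) : List Char :=
  (data.map String.toList).map (fun l => l.getD c ' ')

-- what A appends for row k (flatMap form)
def aRow (data : List String) (offset : Int) (width k : Nat) : List (Int × Int) :=
  (List.range width).flatMap (fun c =>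
    if (data.getD k "").toList.getD c ' ' = '#' then
      [((((colOf data c).take k).count 'X' : Int) * offset + (k : Int),
        (((data.getD k "").toList.take c).count 'X' : Int) * offset + (c : Int))]
    else [])

-- what B appends while scanning row r (columns < j), starting from row_x = x and col counts colX
def rowGalAux (offset r : Int) (rowChars : List Char) (colX : List Int) (x : Int) (j : Nat) :
    List (Int × Int) :=
  (List.range j).flatMap (fun c =>
    if rowChars.getD c ' ' = '#' then
      [(colX.getD c 0 * offset + r, (x + ((rowChars.take c).count 'X' : Int)) * offset + (c : Int))]
    else [])

-- B's col_x after scanning columns < j of one row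
def colStepF (rowChars : List Char) (colX : List Int) (j : Nat) : List Int :=
  (List.range j).foldl (fun cx c =>
    if rowChars.getD c ' ' = '#' then cx
    else if rowChars.getD c ' ' = 'X' then cx.set c (cx.getD c 0 + 1) else cx) colX

-- B's col_x after whole rows
def colMulti (width : Nat) (rows : List String) (colX : List Int) : List Int :=
  rows.foldl (fun cx d => colStepF d.toList cx width) colX

-- B's galaxies for the remaining rows, given the running col counts
def Fspec (offset : Int) (width : Nat) : List String → Int → List Int → List (Int × Int)
  | [], _, _ => []
  | d :: rows, s, colX =>
      rowGalAux offset s d.toList colX 0 width ++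
        Fspec offset width rows (s + 1) (colStepF d.toList colX width)

lemma foldl_eq_append_flatMap {α β : Type} (f : List β → α → List β) (g : α → List β)
    (l : List α) (h : ∀ acc x, x ∈ l → f acc x = acc ++ g x) :
    ∀ acc, l.foldl f acc = acc ++ l.flatMap g := by
  induction l with
  | nil => intro acc; simp
  | cons a l ih =>
    intro acc
    simp only [List.foldl_cons, List.flatMap_cons]
    rw [h acc a (by simp), ih (fun acc x hx => h acc x (by simp [hx]))]
    simp

lemma flatMap_congr_mem {α β : Type} (l : List α) (f g : α → List β)
    (h : ∀ x ∈ l, f x = g x) : l.flatMap f = l.flatMap g := by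
  induction l with
  | nil => simp
  | cons a l ih =>
    simp only [List.flatMap_cons]
    rw [h a (by simp), ih (fun x hx => h x (by simp [hx]))]

lemma tail_getD (l : List Char) (c : Nat) (d : Char) : l.tail.getD c d = l.getD (c + 1) d := by
  cases l <;> simp [List.getD]

lemma count_take_succ (l : List Char) (j : Nat) :
    (l.take (j + 1)).count 'X' = (l.take j).count 'X' + (if l.getD j ' ' = 'X' then 1 else 0) := by
  rw [List.take_add_one, List.count_append]
  rw [List.getD_eq_getElem?_getD]
  cases h : l[j]? with
  | none => simp
  | some a =>
    simp only [Option.toList, Option.getD]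
    by_cases ha : a = 'X' <;> simp [ha]

lemma pyZipStar_cond (ls : List (List Char)) (hne : ls ≠ []) (hl : ∀ l ∈ ls, 0 < l.length) :
    (ls.isEmpty || ls.any List.isEmpty) = false := by
  rw [Bool.or_eq_false_iff]
  constructor
  · simpa using hne
  · rw [List.any_eq_false]
    intro l hli
    have := hl l hli
    simp only [List.isEmpty_iff]
    intro e; rw [e] at this; simp at this

lemma pyZipStar_getElem? (c : Nat) : ∀ (ls : List (List Char)), ls ≠ [] →
    (∀ l ∈ ls, c < l.length) →
    (pyZipStar ls)[c]? = some (ls.map (fun l => l.getD c ' ')) := by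
  induction c with
  | zero =>
    intro ls hne hl
    rw [pyZipStar, dif_neg (by simp [pyZipStar_cond ls hne (fun l h => hl l h)])]
    simp only [List.getElem?_cons_zero]
    congr 1
    exact List.map_congr_left (fun l hli => by
      have h0 := hl l hli
      cases l with
      | nil => simp at h0
      | cons a t => simp [List.getD])
  | succ c ih =>
    intro ls hne hl
    rw [pyZipStar, dif_neg (by simp [pyZipStar_cond ls hne (fun l h => by have := hl l h; omega)])]
    simp only [List.getElem?_cons_succ]
    rw [ih (ls.map List.tail) (by simpa using hne)
        (fun t ht => by
          obtain ⟨l, hli, rfl⟩ := List.mem_map.mp ht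
          have h0 := hl l hli
          cases l with
          | nil => simp at h0
          | cons a u => simp at h0 ⊢; omega)]
    rw [List.map_map]
    congr 1
    exact List.map_congr_left (fun l _ => tail_getD l c ' ')

lemma transpose_getD (data : List String) (c : Nat) (hne : data ≠ [])
    (hcl : ∀ l ∈ data, c < l.toList.length) :
    (PySem.List.pyGetD (transposePy data) (c : Int) "").toList = colOf data c := by
  have hz := pyZipStar_getElem? c (data.map String.toList) (by simpa using hne)
    (fun l hl => by obtain ⟨s, hs, rfl⟩ := List.mem_map.mp hl; exact hcl s hs)
  rw [PySem.List.pyGetD_natCast]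
  unfold transposePy
  rw [List.getD_eq_getElem?_getD, List.getElem?_map, hz]
  simp [colOf]

lemma length_colStepF (rc : List Char) (colX : List Int) (j : Nat) :
    (colStepF rc colX j).length = colX.length := by
  induction j with
  | zero => rfl
  | succ j ih =>
    unfold colStepF at ih ⊢
    rw [List.range_succ, List.foldl_append, List.foldl_cons, List.foldl_nil]
    split_ifs
    · exact ih
    · rw [List.length_set]; exact ih
    · exact ih

lemma getD_colStepF_of_not_lt (rc : List Char) (colX : List Int) (j c : Nat) (h : ¬ c < j) :
    (colStepF rc colX j).getD c 0 = colX.getD c 0 := by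
  induction j with
  | zero => rfl
  | succ j ih =>
    unfold colStepF at ih ⊢
    rw [List.range_succ, List.foldl_append, List.foldl_cons, List.foldl_nil]
    split_ifs
    · exact ih (by omega)
    · rw [List.getD_eq_getElem?_getD, List.getElem?_set_ne (by omega : j ≠ c),
        ← List.getD_eq_getElem?_getD]
      exact ih (by omega)
    · exact ih (by omega)

lemma colStepF_succ (rc : List Char) (colX : List Int) (j : Nat) :
    colStepF rc colX (j + 1) =
      (if rc.getD j ' ' = '#' then colStepF rc colX j
       else if rc.getD j ' ' = 'X' then
         (colStepF rc colX j).set j ((colStepF rc colX j).getD j 0 + 1)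
       else colStepF rc colX j) := by
  unfold colStepF
  rw [List.range_succ, List.foldl_append, List.foldl_cons, List.foldl_nil]

lemma getD_colStepF_lt (rc : List Char) (colX : List Int) (j c : Nat)
    (hc : c < colX.length) (hcj : c < j) :
    (colStepF rc colX j).getD c 0 =
      colX.getD c 0 + (if rc.getD c ' ' = 'X' then 1 else 0) := by
  induction j with
  | zero => omega
  | succ j ih =>
    rw [colStepF_succ]
    by_cases hcj' : c < j
    · have hne : j ≠ c := by omega
      by_cases h1 : rc.getD j ' ' = '#'
      · rw [if_pos h1]; exact ih hcj'
      · rw [if_neg h1]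
        by_cases h2 : rc.getD j ' ' = 'X'
        · rw [if_pos h2, List.getD_eq_getElem?_getD, List.getElem?_set_ne hne,
            ← List.getD_eq_getElem?_getD]
          exact ih hcj'
        · rw [if_neg h2]; exact ih hcj'
    · have hcj0 : c = j := by omega
      subst hcj0
      have h0 := getD_colStepF_of_not_lt rc colX c c (by omega)
      by_cases h1 : rc.getD c ' ' = '#'
      · have hx : ¬ rc.getD c ' ' = 'X' := by rw [h1]; decide
        rw [if_pos h1, if_neg hx, h0]
        ring
      · rw [if_neg h1]
        by_cases h2 : rc.getD c ' ' = 'X'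
        · have hlen : c < (colStepF rc colX c).length := by rw [length_colStepF]; exact hc
          rw [if_pos h2, if_pos h2, List.getD_eq_getElem?_getD, List.getElem?_set_self hlen,
            Option.getD_some, h0]
        · rw [if_neg h2, if_neg h2, h0]
          ring

lemma rowGalAux_succ (offset r : Int) (rc : List Char) (colX : List Int) (x : Int) (j : Nat) :
    rowGalAux offset r rc colX x (j + 1)
      = rowGalAux offset r rc colX x j ++
        (if rc.getD j ' ' = '#' then
          [(colX.getD j 0 * offset + r, (x + ((rc.take j).count 'X' : Int)) * offset + (j : Int))]
         else []) := by
  unfold rowGalAux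
  rw [List.range_succ, List.flatMap_append]
  simp

lemma altInner_spec (offset r : Int) (rowChars : List Char) (j : Nat)
    (gal : List (Int × Int)) (colX : List Int) (x : Int) :
    (List.range j).foldl (altInner offset r rowChars) ((gal, colX), x)
      = ((gal ++ rowGalAux offset r rowChars colX x j, colStepF rowChars colX j),
         x + ((rowChars.take j).count 'X' : Int)) := by
  induction j with
  | zero => simp [rowGalAux, colStepF]
  | succ j ih =>
    rw [List.range_succ, List.foldl_append, List.foldl_cons, List.foldl_nil, ih,
      rowGalAux_succ, colStepF_succ, count_take_succ]
    unfold altInner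
    have h0 := getD_colStepF_of_not_lt rowChars colX j j (by omega)
    simp only [List.getD_eq_getElem?_getD] at h0 ⊢
    by_cases h1 : rowChars[j]?.getD ' ' = '#'
    · simp [h1, h0, List.append_assoc]
    · by_cases h2 : rowChars[j]?.getD ' ' = 'X'
      · simp [h2]
        ring
      · simp [h1, h2]

lemma altOuter_spec (offset : Int) (width : Nat) :
    ∀ (rows : List String) (s : Int) (gal : List (Int × Int)) (colX : List Int),
    (PySem.List.enumerate rows s).foldl (altOuter offset width) (gal, colX)
      = (gal ++ Fspec offset width rows s colX, colMulti width rows colX) := by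
  intro rows
  induction rows with
  | nil => intro s gal colX; simp [PySem.List.enumerate_nil, Fspec, colMulti]
  | cons d rows ih =>
    intro s gal colX
    rw [PySem.List.enumerate_cons, List.foldl_cons]
    have hstep : altOuter offset width (gal, colX) (s, d)
        = (gal ++ rowGalAux offset s d.toList colX 0 width, colStepF d.toList colX width) := by
      unfold altOuter
      rw [show ((gal, colX), (0 : Int)) = (((gal, colX) : List (Int × Int) × List Int), (0:Int)) from rfl]
      rw [altInner_spec]
    rw [hstep, ih]
    simp [Fspec, colMulti, List.append_assoc]

lemma aInner_eq (data : List String) (offset : Int) (hne : data ≠ [])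
    (hw : ∀ s ∈ data, (data.headD "").toList.length ≤ s.toList.length)
    (k c : Nat) (hk : k < data.length) (hc : c < (data.headD "").toList.length)
    (gal : List (Int × Int)) :
    aInner data offset (k : Int) gal (c : Int)
      = gal ++ (if (data.getD k "").toList.getD c ' ' = '#' then
          [((((colOf data c).take k).count 'X' : Int) * offset + (k : Int),
            (((data.getD k "").toList.take c).count 'X' : Int) * offset + (c : Int))]
        else []) := by
  have ht := transpose_getD data c hne (fun l hl => lt_of_lt_of_le hc (hw l hl))
  simp only [PySem.List.pyGetD_natCast, List.getD_eq_getElem?_getD] at ht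
  unfold aInner
  simp only [PySem.List.pyGetD_natCast, PySem.List.slice_zero_start,
    PySem.List.slice_to_natCast]
  split <;> simp [ht]

lemma A_flat (data : List String) (offset : Int) (hne : data ≠ [])
    (hw : ∀ s ∈ data, (data.headD "").toList.length ≤ s.toList.length) :
    find_galaxies2 data offset
      = (List.range data.length).flatMap (aRow data offset (data.headD "").toList.length) := by
  unfold find_galaxies2
  simp only [PySem.List.pyRange_zero_natCast, List.foldl_map]
  rw [foldl_eq_append_flatMap _ (aRow data offset (data.headD "").toList.length) _
    (fun acc k hk => by
      rw [foldl_eq_append_flatMap (fun gal (c : Nat) => aInner data offset (k : Int) gal (c : Int))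
        (fun (c : Nat) => if (data.getD k "").toList.getD c ' ' = '#' then
          [((((colOf data c).take k).count 'X' : Int) * offset + (k : Int),
            (((data.getD k "").toList.take c).count 'X' : Int) * offset + (c : Int))]
         else []) _
        (fun acc2 c hc => aInner_eq data offset hne hw k c (List.mem_range.mp hk)
          (List.mem_range.mp hc) acc2)]
      rfl) []]
  simp

lemma glue (data : List String) (offset : Int) (width : Nat)
    (hw : ∀ s ∈ data, width ≤ s.toList.length) :
    ∀ (n m : Nat) (colX : List Int), m + n = data.length → colX.length = width →
    (∀ c, c < width → colX.getD c 0 = (((colOf data c).take m).count 'X' : Int)) →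
    Fspec offset width (data.drop m) (m : Int) colX
      = (List.range' m n).flatMap (aRow data offset width) := by
  intro n
  induction n with
  | zero =>
    intro m colX hmn hlen hinv
    rw [List.drop_eq_nil_of_le (by omega)]
    rfl
  | succ n ih =>
    intro m colX hmn hlen hinv
    have hm : m < data.length := by omega
    rw [List.drop_eq_getElem_cons hm, List.range'_succ]
    simp only [Fspec, List.flatMap_cons]
    have hd : data.getD m "" = data[m] := List.getD_eq_getElem data "" hm
    congr 1
    · unfold rowGalAux aRow
      apply flatMap_congr_mem
      intro c hc
      have hcw : c < width := List.mem_range.mp hc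
      rw [hd]
      have hi := hinv c hcw
      simp only [List.getD_eq_getElem?_getD] at hi
      simp [hi]
    · have hcast : ((m : Int) + 1) = ((m + 1 : Nat) : Int) := by push_cast; ring
      rw [hcast]
      apply ih (m + 1) (colStepF (data[m]).toList colX width) (by omega)
        (by rw [length_colStepF]; exact hlen)
      intro c hcw
      have hcol : (colOf data c).getD m ' ' = (data[m]).toList.getD c ' ' := by
        simp [colOf, List.getD_eq_getElem?_getD, List.getElem?_eq_getElem hm]
      rw [getD_colStepF_lt _ _ _ _ (by omega) hcw, hinv c hcw, count_take_succ, hcol]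
      split_ifs <;> push_cast <;> ring

-- ===== VERDICT (by name: the statement is the Claim_ definition above) =====
theorem find_galaxies2_spec : Claim_equal_find_galaxies2 := by
  intro data offset _hdom hpre
  unfold Spec_find_galaxies2
  cases data with
  | nil => rfl
  | cons d0 rest =>
    have hne : (d0 :: rest : List String) ≠ [] := by simp
    rw [A_flat _ _ hne hpre]
    have hB : find_galaxies2_alt (d0 :: rest) offset
        = ((PySem.List.enumerate (d0 :: rest)).foldl (altOuter offset d0.toList.length)
            ([], List.replicate d0.toList.length 0)).1 := rfl
    rw [hB, altOuter_spec]
    have hg := glue (d0 :: rest) offset d0.toList.length (by exact hpre)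
      (d0 :: rest).length 0 (List.replicate d0.toList.length 0) (by simp) (by simp)
      (by intro c hc; simp)
    simp only [List.drop_zero, Nat.cast_zero] at hg
    rw [hg, ← List.range_eq_range']
    simp
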